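-- pv_equiv track=rewrite | github.com/DebonairPuma/Headline2 | setupFunctions.py | mapWord
-- ===== SOURCE A (Python) =====
-- def mapWord(word):
-- 	word = word.upper()
-- 	pos = len(word)
-- 	mapping = {}
-- 	found = False
--
-- 	for i in range(0,len(word)):
-- 		if word[i] in mapping:
-- 			found = True
-- 			if mapping[word[i]][0]<pos:
-- 				pos = mapping[word[i]][0]
-- 		else:
-- 			mapping[word[i]] = []
-- 			mapping[word[i]].append(i)
--
-- 	return (found,pos,mapping)
-- ===== SOURCE B (Python) =====
-- def mapWord(word):
--     w = word.upper()
--     counts = {}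
--     for ch in w:
--         counts[ch] = counts.get(ch, 0) + 1
--     mapping = {}
--     for i in range(len(w)):
--         if w[i] not in mapping:
--             mapping[w[i]] = [i]
--     found = any(c > 1 for c in counts.values())
--     pos = min((mapping[ch][0] for ch, c in counts.items() if c > 1), default=len(w))
--     return (found, pos, mapping)
-- ===== Notes on version B (the rewrite author's own statement) =====
-- stated objective: alternative
-- what changed: A's single stateful scan (running min and found flag updated while building the dict) is replaced by a count-first decomposition: build occurrence counts, build the first-occurrence map in a separate indexed pass, then derive found from the counts and pos as min over first indices of repeated chars with default len(word).
import Mathlib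
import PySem

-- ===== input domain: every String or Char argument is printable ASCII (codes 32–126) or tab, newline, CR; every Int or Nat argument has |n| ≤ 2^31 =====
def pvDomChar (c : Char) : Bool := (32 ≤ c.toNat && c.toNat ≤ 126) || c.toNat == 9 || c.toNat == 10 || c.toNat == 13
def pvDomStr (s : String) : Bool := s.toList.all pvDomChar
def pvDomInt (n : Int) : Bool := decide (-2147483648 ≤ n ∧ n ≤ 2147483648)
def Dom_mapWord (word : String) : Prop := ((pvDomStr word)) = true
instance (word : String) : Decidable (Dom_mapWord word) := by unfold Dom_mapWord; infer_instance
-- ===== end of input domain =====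

-- B replaces A's single stateful scan by a count-first decomposition (occurrence counts, then a
-- first-occurrence map, then found/pos read off from them); objective: alternative, same cost.

-- ===== PORT A =====
-- A's loop body: state is (pos, mapping, found); one step per (index, 1-char-string).
def mapWordStep (st : Int × PySem.Dict String (List Int) × Bool)
    (p : Int × String) : Int × PySem.Dict String (List Int) × Bool :=
  let pos := st.1; let mapping := st.2.1; let found := st.2.2
  if mapping.contains p.2 then
    -- found = True; if mapping[word[i]][0] < pos: pos = mapping[word[i]][0]
    let v := PySem.List.pyGetD (mapping.getD p.2 []) 0 0   -- mapping[word[i]][0], the list is always [j]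
    if v < pos then (v, mapping, true) else (pos, mapping, true)
  else
    -- mapping[word[i]] = []; mapping[word[i]].append(i)
    (pos, mapping.insert p.2 [p.1], found)

def mapWord (word : String) : Bool × Int × (List (String × List Int)) :=
  let w := (PySem.Str.upper word).toList.map Char.toString   -- word.upper(), its chars as 1-char strings
  let st := (PySem.List.enumerate w 0).foldl mapWordStep ((w.length : Int), PySem.Dict.empty, false)
  (st.2.2, st.1, st.2.1.items)

-- ===== PORT B =====
def mapWord_alt (word : String) : Bool × Int × (List (String × List Int)) :=
  let w := (PySem.Str.upper word).toList.map Char.toString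
  -- counts[ch] = counts.get(ch, 0) + 1
  let counts := w.foldl (fun d ch => d.insert ch (d.getD ch 0 + 1)) (PySem.Dict.empty : PySem.Dict String Int)
  -- if w[i] not in mapping: mapping[w[i]] = [i]
  let mapping := (PySem.List.enumerate w 0).foldl
    (fun d p => if d.contains p.2 then d else d.insert p.2 [p.1]) PySem.Dict.empty
  -- found = any(c > 1 for c in counts.values())
  let found := counts.values.any (fun c => 1 < c)
  -- pos = min((mapping[ch][0] for ch, c in counts.items() if c > 1), default=len(w))
  let cand := (counts.items.filter (fun q => 1 < q.2)).map
    (fun q => PySem.List.pyGetD (mapping.getD q.1 []) 0 0)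
  let pos := (PySem.List.min? cand (fun x => x)).getD (w.length : Int)
  (found, pos, mapping.items)

-- ===== PRECONDITION & SPEC =====
def Spec_mapWord (word : String) (out : Bool × Int × (List (String × List Int))) : Prop := out = mapWord_alt word
instance (word : String) (out : Bool × Int × (List (String × List Int))) : Decidable (Spec_mapWord word out) := by unfold Spec_mapWord; infer_instance

-- ===== CLAIM (what is proved, stated in full; the proofs are below) =====
def Claim_equal_mapWord : Prop := ∀ (word : String), Dom_mapWord word → Spec_mapWord word (mapWord word)

-- ===== LEMMAS AND PROOFS =====

-- The B-side first-occurrence fold, over an arbitrary start dict/index.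
def focFold (l : List String) (s : Int) (d : PySem.Dict String (List Int)) :
    PySem.Dict String (List Int) :=
  (PySem.List.enumerate l s).foldl
    (fun d p => if d.contains p.2 then d else d.insert p.2 [p.1]) d

-- The sequence of values A's loop compares against pos (one per repeated occurrence).
def hits (l : List String) (s : Int) (d : PySem.Dict String (List Int)) : List Int :=
  match l with
  | [] => []
  | k :: t =>
    if d.contains k then PySem.List.pyGetD (d.getD k []) 0 0 :: hits t (s + 1) d
    else hits t (s + 1) (d.insert k [s])

theorem focFold_nil (s : Int) (d : PySem.Dict String (List Int)) : focFold [] s d = d := rfl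

theorem focFold_cons (k : String) (t : List String) (s : Int) (d : PySem.Dict String (List Int)) :
    focFold (k :: t) s d
      = focFold t (s + 1) (if d.contains k then d else d.insert k [s]) := by
  simp only [focFold, PySem.List.enumerate_cons, List.foldl_cons]

-- Master characterisation of A's fold: pos is a running min over `hits`, the dict is the
-- first-occurrence fold, found records whether any hit occurred.
theorem afold_char (l : List String) (s pos : Int) (d : PySem.Dict String (List Int)) (f : Bool) :
    (PySem.List.enumerate l s).foldl mapWordStep (pos, d, f)
      = ((hits l s d).foldl min pos, focFold l s d, f || !(hits l s d).isEmpty) := by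
  induction l generalizing s pos d f with
  | nil => simp [hits, focFold, PySem.List.enumerate_nil]
  | cons k t ih =>
    rw [PySem.List.enumerate_cons, List.foldl_cons, focFold_cons]
    by_cases h : d.contains k
    · have hstep : mapWordStep (pos, d, f) (s, k)
          = (min (PySem.List.pyGetD (d.getD k []) 0 0) pos, d, true) := by
        simp only [mapWordStep, h, if_true]
        rcases lt_or_ge (PySem.List.pyGetD (d.getD k []) 0 0) pos with hlt | hge
        · rw [if_pos hlt, min_eq_left hlt.le]
        · rw [if_neg (not_lt.mpr hge), min_eq_right hge]
      rw [hstep, ih]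
      simp [hits, h, min_comm]
    · have hstep : mapWordStep (pos, d, f) (s, k) = (pos, d.insert k [s], f) := by
        simp [mapWordStep, h]
      rw [hstep, ih]
      simp [hits, h]

-- foldl min: membership and lower-bound facts, then equality for lists with the same elements.
theorem foldl_min_mem (l : List Int) (a : Int) : l.foldl min a ∈ a :: l := by
  induction l generalizing a with
  | nil => simp
  | cons x t ih =>
    rw [List.foldl_cons]
    rcases List.mem_cons.mp (ih (min a x)) with h' | h'
    · rw [h']
      rcases min_choice a x with m | m <;> rw [m] <;> simp
    · exact List.mem_cons.mpr (Or.inr (List.mem_cons.mpr (Or.inr h')))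

theorem foldl_min_le (l : List Int) (a : Int) : ∀ x ∈ a :: l, l.foldl min a ≤ x := by
  induction l generalizing a with
  | nil => simp
  | cons y t ih =>
    intro x hx
    rw [List.foldl_cons]
    rcases List.mem_cons.mp hx with rfl | hx'
    · exact le_trans (ih (min x y) (min x y) (List.mem_cons_self ..)) (min_le_left x y)
    · rcases List.mem_cons.mp hx' with rfl | hx''
      · exact le_trans (ih (min a x) (min a x) (List.mem_cons_self ..)) (min_le_right a x)
      · exact ih (min a y) x (List.mem_cons.mpr (Or.inr hx''))

theorem foldl_min_congr (a : Int) (xs ys : List Int) (h : ∀ v, v ∈ xs ↔ v ∈ ys) :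
    xs.foldl min a = ys.foldl min a := by
  apply le_antisymm
  · apply foldl_min_le
    rcases List.mem_cons.mp (foldl_min_mem ys a) with h' | h'
    · simp [h']
    · exact List.mem_cons.mpr (Or.inr ((h _).mpr h'))
  · apply foldl_min_le
    rcases List.mem_cons.mp (foldl_min_mem xs a) with h' | h'
    · simp [h']
    · exact List.mem_cons.mpr (Or.inr ((h _).mp h'))

-- Membership in `hits`: exactly the first-stored value of each repeated key.
theorem hits_mem (l : List String) (s : Int) (d : PySem.Dict String (List Int)) (v : Int) :
    v ∈ hits l s d ↔
      ∃ k, ((d.contains k = true ∧ k ∈ l) ∨ (d.contains k = false ∧ 1 < l.count k)) ∧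
        v = (if d.contains k then PySem.List.pyGetD (d.getD k []) 0 0 else s + (l.idxOf k : Int)) := by
  induction l generalizing s d with
  | nil => simp [hits]
  | cons x t ih =>
    cases hcon : d.contains x with
    | true =>
      rw [hits, if_pos hcon, List.mem_cons, ih]
      constructor
      · rintro (rfl | ⟨k, hc, rfl⟩)
        · exact ⟨x, Or.inl ⟨hcon, List.mem_cons_self ..⟩, by simp [hcon]⟩
        · rcases hc with ⟨hk, hm⟩ | ⟨hk, hcnt⟩
          · exact ⟨k, Or.inl ⟨hk, List.mem_cons.mpr (Or.inr hm)⟩, by simp [hk]⟩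
          · have hne : k ≠ x := by rintro rfl; rw [hcon] at hk; cases hk
            refine ⟨k, Or.inr ⟨hk, by simpa [Ne.symm hne] using hcnt⟩, ?_⟩
            rw [if_neg (by simp [hk]), if_neg (by simp [hk])]
            simp [Ne.symm hne]
            ring
      · rintro ⟨k, hc, rfl⟩
        rcases hc with ⟨hk, hm⟩ | ⟨hk, hcnt⟩
        · rcases List.mem_cons.mp hm with rfl | hm'
          · exact Or.inl (by simp [hcon])
          · exact Or.inr ⟨k, Or.inl ⟨hk, hm'⟩, by simp [hk]⟩
        · have hne : k ≠ x := by rintro rfl; rw [hcon] at hk; cases hk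
          refine Or.inr ⟨k, Or.inr ⟨hk, by simpa [Ne.symm hne] using hcnt⟩, ?_⟩
          rw [if_neg (by simp [hk]), if_neg (by simp [hk])]
          simp [Ne.symm hne]
          ring
    | false =>
      rw [hits, if_neg (by simp [hcon]), ih]
      constructor
      · rintro ⟨k, hc, rfl⟩
        by_cases hkx : k = x
        · subst hkx
          have hck : (d.insert k [s]).contains k = true := PySem.Dict.contains_insert_self ..
          rcases hc with ⟨_, hm⟩ | ⟨hk', _⟩
          swap; · rw [hck] at hk'; cases hk'
          refine ⟨k, Or.inr ⟨hcon, ?_⟩, ?_⟩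
          · have : 0 < t.count k := List.count_pos_iff.mpr hm
            simp; omega
          · rw [if_pos hck, if_neg (by simp [hcon])]
            simp [PySem.Dict.getD_insert_self]
        · have hck : (d.insert x [s]).contains k = d.contains k := by
            rw [PySem.Dict.contains_insert]; simp [hkx]
          rcases hc with ⟨hk', hm⟩ | ⟨hk', hcnt⟩
          · refine ⟨k, Or.inl ⟨by rw [← hck]; exact hk', List.mem_cons.mpr (Or.inr hm)⟩, ?_⟩
            rw [if_pos hk', if_pos (by rw [← hck]; exact hk')]
            rw [PySem.Dict.getD_insert_of_ne (hne := hkx)]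
          · refine ⟨k, Or.inr ⟨by rw [← hck]; exact hk', by simpa [Ne.symm hkx] using hcnt⟩, ?_⟩
            rw [if_neg (by simp [hk']), if_neg (by rw [hck] at hk'; simp [hk'])]
            simp [Ne.symm hkx]
            ring
      · rintro ⟨k, hc, rfl⟩
        rcases hc with ⟨hk', hm⟩ | ⟨hk', hcnt⟩
        · have hkx : k ≠ x := by rintro rfl; rw [hcon] at hk'; cases hk'
          have hck : (d.insert x [s]).contains k = true := by
            rw [PySem.Dict.contains_insert]; simp [hk']
          refine ⟨k, Or.inl ⟨hck, ?_⟩, ?_⟩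
          · rcases List.mem_cons.mp hm with rfl | hm'
            · exact absurd rfl hkx
            · exact hm'
          · rw [if_pos hck, if_pos hk', PySem.Dict.getD_insert_of_ne (hne := hkx)]
        · by_cases hkx : k = x
          · subst hkx
            have hck : (d.insert k [s]).contains k = true := PySem.Dict.contains_insert_self ..
            have hm : k ∈ t := by
              rw [List.count_cons_self] at hcnt
              exact List.count_pos_iff.mp (by omega)
            refine ⟨k, Or.inl ⟨hck, hm⟩, ?_⟩
            rw [if_pos hck, if_neg (by simp [hcon])]
            simp [PySem.Dict.getD_insert_self]
          · have hck : (d.insert x [s]).contains k = false := by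
              rw [PySem.Dict.contains_insert]; simp [hkx, hk']
            refine ⟨k, Or.inr ⟨hck, by simpa [Ne.symm hkx] using hcnt⟩, ?_⟩
            rw [if_neg (by simp [hk']), if_neg (by simp [hck])]
            simp [Ne.symm hkx]
            ring

-- getD on the first-occurrence fold: each present key stores its first index.
theorem focFold_getD (l : List String) (s : Int) (d : PySem.Dict String (List Int)) (k : String) :
    (focFold l s d).getD k []
      = if d.contains k then d.getD k []
        else if k ∈ l then [s + (l.idxOf k : Int)] else [] := by
  induction l generalizing s d with
  | nil =>
    simp only [focFold_nil, List.not_mem_nil, if_neg (fun h => h : ¬ False)]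
    by_cases hk : d.contains k
    · simp [hk]
    · simp [hk, PySem.Dict.getD_of_not_contains d ([]) (k := k) (by simpa using hk)]
  | cons x t ih =>
    cases hcon : d.contains x with
    | true =>
      rw [focFold_cons, if_pos hcon, ih]
      by_cases hk : d.contains k
      · simp [hk]
      · have hkx : k ≠ x := by rintro rfl; exact hk hcon
        rw [if_neg hk, if_neg hk]
        by_cases hm : k ∈ t
        · rw [if_pos hm, if_pos (List.mem_cons.mpr (Or.inr hm))]
          simp [Ne.symm hkx]
          ring
        · rw [if_neg hm, if_neg (by simp [hkx, hm])]
    | false =>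
      rw [focFold_cons, if_neg (by simp [hcon]), ih]
      by_cases hkx : k = x
      · subst hkx
        rw [if_pos (PySem.Dict.contains_insert_self ..), if_neg (by simp [hcon]),
          if_pos (List.mem_cons_self ..), PySem.Dict.getD_insert_self]
        simp
      · have hck : (d.insert x [s]).contains k = d.contains k := by
          rw [PySem.Dict.contains_insert]; simp [hkx]
        rw [hck]
        by_cases hk : d.contains k
        · rw [if_pos hk, if_pos hk, PySem.Dict.getD_insert_of_ne (hne := hkx)]
        · rw [if_neg hk, if_neg hk]
          by_cases hm : k ∈ t
          · rw [if_pos hm, if_pos (List.mem_cons.mpr (Or.inr hm))]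
            simp [Ne.symm hkx]
            ring
          · rw [if_neg hm, if_neg (by simp [hkx, hm])]

-- min with a default bounding the list from above: Python's min(gen, default=a).
theorem min?_getD_of_le (xs : List Int) (a : Int) (h : ∀ x ∈ xs, x ≤ a) :
    (PySem.List.min? xs (fun y => y)).getD a = xs.foldl min a := by
  cases xs with
  | nil => simp [PySem.List.min?]
  | cons c t =>
    rw [PySem.List.min?_id_cons, Option.getD_some, List.foldl_cons,
      min_eq_right (h c (List.mem_cons_self ..))]

theorem mapWord_key (l : List String) :
    (fun st : Int × PySem.Dict String (List Int) × Bool => (st.2.2, st.1, st.2.1.items))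
        ((PySem.List.enumerate l 0).foldl mapWordStep ((l.length : Int), PySem.Dict.empty, false))
      = (let counts := l.foldl (fun d ch => d.insert ch (d.getD ch 0 + 1)) (PySem.Dict.empty : PySem.Dict String Int)
         let mapping := (PySem.List.enumerate l 0).foldl
           (fun d p => if d.contains p.2 then d else d.insert p.2 [p.1]) PySem.Dict.empty
         let found := counts.values.any (fun c => 1 < c)
         let cand := (counts.items.filter (fun q => 1 < q.2)).map
           (fun q => PySem.List.pyGetD (mapping.getD q.1 []) 0 0)
         (found, (PySem.List.min? cand (fun x => x)).getD (l.length : Int), mapping.items)) := by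
  rw [afold_char]
  dsimp only
  have hcounter : l.foldl (fun d ch => d.insert ch (d.getD ch 0 + 1)) (PySem.Dict.empty : PySem.Dict String Int)
      = PySem.Dict.counter l := PySem.Dict.foldl_insert_getD_add_one_eq_counter ..
  -- membership in hits at the empty start dict
  have hhits : ∀ v : Int, v ∈ hits l 0 PySem.Dict.empty ↔
      ∃ k, 1 < l.count k ∧ v = (l.idxOf k : Int) := by
    intro v
    rw [hits_mem]
    constructor
    · rintro ⟨k, hc, rfl⟩
      rcases hc with ⟨hk, _⟩ | ⟨_, hcnt⟩
      · rw [PySem.Dict.contains_empty] at hk; cases hk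
      · exact ⟨k, hcnt, by simp⟩
    · rintro ⟨k, hcnt, rfl⟩
      exact ⟨k, Or.inr ⟨PySem.Dict.contains_empty .., hcnt⟩, by simp⟩
  -- the candidate list of B
  have hcand : ((PySem.Dict.counter l).items.filter (fun q => 1 < q.2)).map
        (fun q => PySem.List.pyGetD
          (((PySem.List.enumerate l 0).foldl
            (fun d p => if d.contains p.2 then d else d.insert p.2 [p.1]) PySem.Dict.empty).getD q.1 []) 0 0)
      = ((PySem.Set.ofList l).filter (fun k => 1 < (l.count k : Int))).map (fun k => (l.idxOf k : Int)) := by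
    rw [PySem.Dict.items_counter, List.filter_map, List.map_map]
    apply List.map_congr_left
    intro k hk
    simp only [List.mem_filter, PySem.Set.mem_ofList] at hk
    simp only [Function.comp]
    rw [show ((PySem.List.enumerate l 0).foldl
        (fun d p => if d.contains p.2 then d else d.insert p.2 [p.1]) PySem.Dict.empty)
        = focFold l 0 PySem.Dict.empty from rfl]
    rw [focFold_getD, if_neg (by simp [PySem.Dict.contains_empty]), if_pos hk.1]
    simp [PySem.List.pyGetD_zero_cons]
  have hcandmem : ∀ v : Int,
      v ∈ ((PySem.Set.ofList l).filter (fun k => 1 < (l.count k : Int))).map (fun k => (l.idxOf k : Int))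
        ↔ ∃ k, 1 < l.count k ∧ v = (l.idxOf k : Int) := by
    intro v
    simp only [List.mem_map, List.mem_filter, PySem.Set.mem_ofList]
    constructor
    · rintro ⟨k, ⟨_, hcnt⟩, rfl⟩; exact ⟨k, by simpa using hcnt, rfl⟩
    · rintro ⟨k, hcnt, rfl⟩
      exact ⟨k, ⟨List.count_pos_iff.mp (by omega), by simpa using hcnt⟩, rfl⟩
  -- found components agree
  have hfound : (false || !(hits l 0 PySem.Dict.empty).isEmpty)
      = (PySem.Dict.counter l).values.any (fun c => 1 < c) := by
    rw [Bool.false_or, Bool.eq_iff_iff]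
    simp only [Bool.not_eq_true']
    rw [show (PySem.Dict.counter l).values = (PySem.Dict.counter l).items.map (·.2) from rfl,
      PySem.Dict.items_counter]
    simp only [List.any_eq_true, List.mem_map, List.isEmpty_eq_false_iff_exists_mem,
      PySem.Set.mem_ofList, decide_eq_true_eq]
    constructor
    · rintro ⟨v, hv⟩
      obtain ⟨k, hcnt, rfl⟩ := (hhits v).mp hv
      exact ⟨(l.count k : Int), ⟨(k, (l.count k : Int)),
        ⟨k, List.count_pos_iff.mp (by omega), rfl⟩, rfl⟩, by exact_mod_cast hcnt⟩
    · rintro ⟨x, ⟨a, ⟨k, hkl, rfl⟩, rfl⟩, hx⟩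
      exact ⟨(l.idxOf k : Int), (hhits _).mpr ⟨k, by simpa using hx, rfl⟩⟩
  -- pos components agree
  have hpos : (hits l 0 PySem.Dict.empty).foldl min (l.length : Int)
      = (PySem.List.min? (((PySem.Dict.counter l).items.filter (fun q => 1 < q.2)).map
          (fun q => PySem.List.pyGetD
            (((PySem.List.enumerate l 0).foldl
              (fun d p => if d.contains p.2 then d else d.insert p.2 [p.1]) PySem.Dict.empty).getD q.1 []) 0 0))
          (fun x => x)).getD (l.length : Int) := by
    rw [hcand, min?_getD_of_le]
    · exact foldl_min_congr _ _ _ (fun v => by rw [hhits, ← hcandmem v])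
    · intro x hx
      obtain ⟨k, hcnt, rfl⟩ := (hcandmem x).mp hx
      have : k ∈ l := List.count_pos_iff.mp (by omega)
      exact_mod_cast (List.idxOf_lt_length_of_mem this).le
  rw [hcounter, hfound, hpos]
  rfl

-- ===== VERDICT (by name: the statement is the Claim_ definition above) =====
theorem mapWord_spec : Claim_equal_mapWord := by
  intro word _
  unfold Spec_mapWord mapWord mapWord_alt
  exact mapWord_key ((PySem.Str.upper word).toList.map Char.toString)
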